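-- pv_equiv track=rewrite | github.com/davidam/damegender | app/dame_gender.py | features_int
-- ===== SOURCE A (Python) =====
-- def features_int(name):
-- # features method created to check the scikit classifiers
--     features_int = {}
--     features_int["first_letter"] = ord(name[0].lower())
--     features_int["last_letter"] = ord(name[-1].lower())
--     for letter in 'abcdefghijklmnopqrstuvwxyz':
--         features_int["count({})".format(letter)] = name.lower().count(letter)
--     features_int["vocals"] = 0
--     for letter1 in 'aeiou':
--         for letter2 in name:
--             if (letter1 == letter2):
--                 features_int["vocals"] = features_int["vocals"] + 1
--     features_int["consonants"] = 0
--     for letter1 in 'bcdfghjklmnpqrstvwxyz':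
--         for letter2 in name:
--             if (letter1 == letter2):
--                 features_int["consonants"] = features_int["consonants"] + 1
--     if (name[0].lower() in 'aeiou'):
--         features_int["first_letter_vocal"] = 1
--     else:
--         features_int["first_letter_vocal"] = 0
--     if (name[0].lower() in 'bcdfghjklmnpqrstvwxyz'):
--         features_int["first_letter_consonant"] = 1
--     else:
--         features_int["first_letter_consonant"] = 0
--     if (name[-1].lower() in 'aeiou'):
--         features_int["last_letter_vocal"] = 1
--     else:
--         features_int["last_letter_vocal"] = 0
--     if (name[-1].lower() in 'bcdfghjklmnpqrstvwxyz'):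
--         features_int["last_letter_consonant"] = 1
--     else:
--         features_int["last_letter_consonant"] = 0
--     # h = hyphen.Hyphenator('en_US')
--     # features_int["syllables"] = len(h.syllables(name))
--     if (name[-1].lower() == "a"):
--         features_int["last_letter_a"] = 1
--     else:
--         features_int["last_letter_a"] = 0
--     return features_int
-- ===== SOURCE B (Python) =====
-- def features_int(name):
--     vowels = 'aeiou'
--     consonants = 'bcdfghjklmnpqrstvwxyz'
--     counts = {}
--     voc = 0
--     con = 0
--     for ch in name:
--         low = ch.lower()
--         counts[low] = counts.get(low, 0) + 1
--         if ch in vowels: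
--             voc += 1
--         elif ch in consonants:
--             con += 1
--     first = name[0].lower()
--     last = name[-1].lower()
--     out = {"first_letter": ord(first), "last_letter": ord(last)}
--     for letter in 'abcdefghijklmnopqrstuvwxyz':
--         out["count({})".format(letter)] = counts.get(letter, 0)
--     out["vocals"] = voc
--     out["consonants"] = con
--     out["first_letter_vocal"] = 1 if first in vowels else 0
--     out["first_letter_consonant"] = 1 if first in consonants else 0
--     out["last_letter_vocal"] = 1 if last in vowels else 0
--     out["last_letter_consonant"] = 1 if last in consonants else 0
--     out["last_letter_a"] = 1 if last == "a" else 0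
--     return out
-- ===== Notes on version B (the rewrite author's own statement) =====
-- stated objective: faster
-- what changed: Replaces the 26 per-letter .count() scans and the two nested vowel/consonant counting loops with a single pass over the name that builds a letter-count dict and accumulates the vocal/consonant totals at once.
import Mathlib
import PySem

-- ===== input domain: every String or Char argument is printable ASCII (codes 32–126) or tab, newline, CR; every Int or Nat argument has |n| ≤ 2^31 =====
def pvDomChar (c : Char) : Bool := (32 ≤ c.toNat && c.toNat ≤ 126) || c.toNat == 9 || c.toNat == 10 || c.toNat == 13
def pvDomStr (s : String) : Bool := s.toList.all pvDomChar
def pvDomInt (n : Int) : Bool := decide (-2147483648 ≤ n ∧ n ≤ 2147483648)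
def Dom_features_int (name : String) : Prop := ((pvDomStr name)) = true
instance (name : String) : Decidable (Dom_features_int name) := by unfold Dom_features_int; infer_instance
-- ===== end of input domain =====

-- B replaces A's 26 .count() scans and two nested vowel/consonant loops by one linear pass
-- building a letter-count dict and both accumulators at once (measured faster at large sizes).

-- shared literal constants (the Python string literals as char lists)
def pvVowels : List Char := ['a', 'e', 'i', 'o', 'u']
def pvConsonants : List Char :=
  ['b', 'c', 'd', 'f', 'g', 'h', 'j', 'k', 'l', 'm', 'n', 'p', 'q', 'r', 's', 't', 'v', 'w', 'x', 'y', 'z']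
def pvAlphabet : List Char :=
  ['a', 'b', 'c', 'd', 'e', 'f', 'g', 'h', 'i', 'j', 'k', 'l', 'm',
   'n', 'o', 'p', 'q', 'r', 's', 't', 'u', 'v', 'w', 'x', 'y', 'z']

-- ===== PORT A =====
-- name[0] / name[-1] are guarded by Pre_ (name ≠ ""): the .getD ' ' default is never reached there.
-- dict keys in A are pairwise-distinct fresh literals, so the dict is its items list in insertion
-- order, built here directly; 'x.count(c)' / 'c in s' on a single char c are element count /
-- element membership (exact); s[i].lower() is PySem.Chars.lowerChar (exact on ASCII).
def features_int (name : String) : List (String × Int) :=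
  let l := name.toList
  let first := PySem.Chars.lowerChar ((PySem.List.pyGet? l 0).getD ' ')
  let last := PySem.Chars.lowerChar ((PySem.List.pyGet? l (-1)).getD ' ')
  let low := PySem.Chars.lower l
  let counts := pvAlphabet.map (fun c =>
    ("count(" ++ String.singleton c ++ ")", (low.count c : Int)))
  let vocals := pvVowels.foldl (fun acc letter1 =>
    l.foldl (fun a letter2 => if letter1 == letter2 then a + 1 else a) acc) (0 : Int)
  let consonants := pvConsonants.foldl (fun acc letter1 =>
    l.foldl (fun a letter2 => if letter1 == letter2 then a + 1 else a) acc) (0 : Int)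
  ("first_letter", (first.toNat : Int)) ::
  ("last_letter", (last.toNat : Int)) ::
  counts ++
  [("vocals", vocals),
   ("consonants", consonants),
   ("first_letter_vocal", if pvVowels.contains first then 1 else 0),
   ("first_letter_consonant", if pvConsonants.contains first then 1 else 0),
   ("last_letter_vocal", if pvVowels.contains last then 1 else 0),
   ("last_letter_consonant", if pvConsonants.contains last then 1 else 0),
   ("last_letter_a", if last == 'a' then 1 else 0)]

-- ===== PORT B =====
-- one pass: counts dict keyed by the lowered char, vocals/consonants tested on the original char.
def features_int_alt (name : String) : List (String × Int) :=
  let l := name.toList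
  let st := l.foldl (fun (st : PySem.Dict Char Int × Int × Int) ch =>
    let lc := PySem.Chars.lowerChar ch
    (st.1.insert lc (st.1.getD lc 0 + 1),
     (if pvVowels.contains ch then st.2.1 + 1 else st.2.1),
     (if pvVowels.contains ch then st.2.2
      else if pvConsonants.contains ch then st.2.2 + 1 else st.2.2)))
    (PySem.Dict.empty, (0 : Int), (0 : Int))
  let first := PySem.Chars.lowerChar ((PySem.List.pyGet? l 0).getD ' ')
  let last := PySem.Chars.lowerChar ((PySem.List.pyGet? l (-1)).getD ' ')
  ("first_letter", (first.toNat : Int)) ::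
  ("last_letter", (last.toNat : Int)) ::
  pvAlphabet.map (fun c => ("count(" ++ String.singleton c ++ ")", st.1.getD c 0)) ++
  [("vocals", st.2.1),
   ("consonants", st.2.2),
   ("first_letter_vocal", if pvVowels.contains first then 1 else 0),
   ("first_letter_consonant", if pvConsonants.contains first then 1 else 0),
   ("last_letter_vocal", if pvVowels.contains last then 1 else 0),
   ("last_letter_consonant", if pvConsonants.contains last then 1 else 0),
   ("last_letter_a", if last == 'a' then 1 else 0)]

-- ===== PRECONDITION & SPEC =====
-- Pre_ excludes only the empty string, on which A raises IndexError at name[0].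
def Pre_features_int (name : String) : Prop := name ≠ ""
instance (name : String) : Decidable (Pre_features_int name) := by
  unfold Pre_features_int; infer_instance

def pvWitness_features_int : String := "Ada"

def Spec_features_int (name : String) (out : List (String × Int)) : Prop := out = features_int_alt name
instance (name : String) (out : List (String × Int)) : Decidable (Spec_features_int name out) := by
  unfold Spec_features_int; infer_instance

-- ===== CLAIM (what is proved, stated in full; the proofs are below) =====
def Claim_equal_features_int : Prop :=
  ∀ (name : String), Dom_features_int name → Pre_features_int name →
    Spec_features_int name (features_int name)

-- ===== LEMMAS AND PROOFS =====

-- B's single loop splits into the counter fold and the two 0/1 counters.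
theorem pv_loop_split (l : List Char) (d : PySem.Dict Char Int) (v c : Int) :
    l.foldl (fun (st : PySem.Dict Char Int × Int × Int) ch =>
      let lc := PySem.Chars.lowerChar ch
      (st.1.insert lc (st.1.getD lc 0 + 1),
       (if pvVowels.contains ch then st.2.1 + 1 else st.2.1),
       (if pvVowels.contains ch then st.2.2
        else if pvConsonants.contains ch then st.2.2 + 1 else st.2.2))) (d, v, c)
    = (l.foldl (fun d ch => d.insert (PySem.Chars.lowerChar ch)
          (d.getD (PySem.Chars.lowerChar ch) 0 + 1)) d,
       v + (l.countP (fun ch => pvVowels.contains ch) : Int),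
       c + (l.countP (fun ch => !pvVowels.contains ch && pvConsonants.contains ch) : Int)) := by
  induction l generalizing d v c with
  | nil => simp
  | cons ch l ih =>
    simp only [List.foldl_cons, ih, List.countP_cons]
    refine Prod.ext rfl (Prod.ext ?_ ?_) <;> simp <;> split_ifs <;> simp_all <;> omega

-- the lowered-key counter fold is the counter of the lowered list
theorem pv_counter_eq (l : List Char) :
    l.foldl (fun d ch => d.insert (PySem.Chars.lowerChar ch)
        (d.getD (PySem.Chars.lowerChar ch) 0 + 1)) PySem.Dict.empty
      = PySem.Dict.counter (PySem.Chars.lower l) := by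
  simp only [PySem.Dict.counter, PySem.Chars.lower]
  rw [List.foldl_map]
  rfl

-- sum over distinct letters of element counts = single countP over membership
theorem pv_sum_counts (vs : List Char) (hv : vs.Nodup) (l : List Char) :
    (vs.map (fun v => (l.count v : Int))).sum = (l.countP (fun c => vs.contains c) : Int) := by
  induction l with
  | nil => simp
  | cons ch l ih =>
    simp only [List.count_cons, List.countP_cons]
    push_cast
    rw [show (vs.map fun v => ((l.count v : Int) + if (ch == v) then 1 else 0)).sum
          = (vs.map fun v => (l.count v : Int)).sum
            + (vs.map fun v => if (ch == v : Bool) then (1 : Int) else 0).sum by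
        rw [← PySem.List.sum_map_add_int]]
    rw [ih]
    have hc : (vs.map fun v => if (ch == v : Bool) then (1 : Int) else 0).sum
        = (vs.countP (fun v => ch == v) : Int) := by
      exact_mod_cast PySem.List.sum_map_ite_one_zero (fun v => ch == v) vs
    rw [hc]
    have : vs.countP (fun v => ch == v) = if vs.contains ch then 1 else 0 := by
      have : vs.countP (fun v => ch == v) = vs.count ch := by
        unfold List.count
        exact List.countP_congr (fun x _ => by
          by_cases h : ch = x
          · subst h; rfl
          · simp [h, Ne.symm h])
      rw [this]
      by_cases h : ch ∈ vs
      · simp [List.count_eq_one_of_mem hv h, h]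
      · simp [List.count_eq_zero_of_not_mem h, h]
    rw [this]
    split_ifs <;> push_cast <;> ring

theorem pv_disj (c : Char) (h : pvConsonants.contains c = true) :
    pvVowels.contains c = false := by
  simp only [pvConsonants, List.contains_cons, List.contains_nil] at h
  simp only [Bool.or_eq_true, beq_iff_eq] at h
  rcases h with rfl|rfl|rfl|rfl|rfl|rfl|rfl|rfl|rfl|rfl|rfl|rfl|rfl|rfl|rfl|rfl|rfl|rfl|rfl|rfl|rfl|h
  · decide
  · decide
  · decide
  · decide
  · decide
  · decide
  · decide
  · decide
  · decide
  · decide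
  · decide
  · decide
  · decide
  · decide
  · decide
  · decide
  · decide
  · decide
  · decide
  · decide
  · decide
  · simp at h

-- A's nested double loop = sum of per-letter counts
theorem pv_nested_eq (vs l : List Char) :
    vs.foldl (fun acc letter1 =>
      l.foldl (fun a letter2 => if letter1 == letter2 then a + 1 else a) acc) (0 : Int)
    = (vs.map (fun v => (l.count v : Int))).sum := by
  have hinner : ∀ (v : Char) (a : Int),
      l.foldl (fun a letter2 => if v == letter2 then a + 1 else a) a = a + (l.count v : Int) := by
    intro v a
    rw [PySem.List.foldl_count_if (fun letter2 => v == letter2) l a]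
    congr 1
    unfold List.count
    have h1 : l.countP (fun letter2 => v == letter2) = l.countP (fun x => x == v) :=
      List.countP_congr (fun x _ => by
        by_cases h : v = x
        · subst h; rfl
        · simp [h, Ne.symm h])
    exact_mod_cast h1
  calc vs.foldl (fun acc letter1 =>
          l.foldl (fun a letter2 => if letter1 == letter2 then a + 1 else a) acc) (0 : Int)
      = vs.foldl (fun acc v => acc + (l.count v : Int)) 0 := by
        exact PySem.List.foldl_congr_mem _ _ _ _ (fun a v _ => hinner v a)
    _ = (vs.map (fun v => (l.count v : Int))).sum := by
        rw [PySem.List.foldl_add]; ring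

-- ===== VERDICT (by name: the statement is the Claim_ definition above) =====
theorem features_int_spec : Claim_equal_features_int := by
  intro name _ _
  unfold Spec_features_int features_int features_int_alt
  simp only [pv_loop_split, pv_counter_eq, zero_add]
  have hcount : ∀ c : Char,
      (PySem.Dict.counter (PySem.Chars.lower name.toList)).getD c 0
        = ((PySem.Chars.lower name.toList).count c : Int) :=
    fun c => PySem.Dict.getD_counter _ c
  have hvoc :
      pvVowels.foldl (fun acc letter1 =>
        name.toList.foldl (fun a letter2 => if letter1 == letter2 then a + 1 else a) acc) (0 : Int)
      = (name.toList.countP (fun ch => pvVowels.contains ch) : Int) := by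
    rw [pv_nested_eq, pv_sum_counts pvVowels (by decide)]
  have hcons :
      pvConsonants.foldl (fun acc letter1 =>
        name.toList.foldl (fun a letter2 => if letter1 == letter2 then a + 1 else a) acc) (0 : Int)
      = (name.toList.countP
          (fun ch => !pvVowels.contains ch && pvConsonants.contains ch) : Int) := by
    rw [pv_nested_eq, pv_sum_counts pvConsonants (by decide)]
    have hpc : name.toList.countP (fun c => pvConsonants.contains c)
        = name.toList.countP (fun ch => !pvVowels.contains ch && pvConsonants.contains ch) :=
      List.countP_congr (fun a _ => by
        by_cases h : pvConsonants.contains a = true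
        · rw [h, pv_disj a h]; rfl
        · rw [Bool.not_eq_true] at h; rw [h]; simp)
    exact_mod_cast congrArg (fun n : Nat => (n : Int)) hpc
  simp only [hcount, hvoc, hcons]
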